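-- pv_equiv track=rewrite | github.com/kmransom56/fortigate-dashboard | populate_fortinet_icons.py | classify_fortinet_device
-- ===== SOURCE A (Python) =====
-- def classify_fortinet_device(filename):
--     """Classify Fortinet devices based on filename patterns"""
--     filename_lower = filename.lower()
--
--     # FortiGate devices
--     if filename_lower.startswith(('fg-', 'fgr-', 'fg_fwf-')):
--         return {
--             'manufacturer': 'Fortinet',
--             'device_type': 'fortigate',
--             'category': 'firewall',
--             'tags': 'fortinet,firewall,security,fortigate'
--         }
--
--     # FortiSwitch devices
--     elif filename_lower.startswith(('fsw-', 'fsr-')):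
--         return {
--             'manufacturer': 'Fortinet',
--             'device_type': 'fortiswitch',
--             'category': 'switch',
--             'tags': 'fortinet,switch,networking,fortiswitch'
--         }
--
--     # FortiAP devices
--     elif filename_lower.startswith('fap-'):
--         return {
--             'manufacturer': 'Fortinet',
--             'device_type': 'fortiap',
--             'category': 'wireless',
--             'tags': 'fortinet,wireless,access_point,fortiap'
--         }
--
--     # FortiAnalyzer/Manager/etc
--     elif filename_lower.startswith(('faz-', 'fmg-', 'fml-', 'fac-')):
--         return {
--             'manufacturer': 'Fortinet',
--             'device_type': 'fortinet_management',
--             'category': 'management',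
--             'tags': 'fortinet,management,analyzer,security'
--         }
--
--     # FortiController
--     elif filename_lower.startswith('fctrl-'):
--         return {
--             'manufacturer': 'Fortinet',
--             'device_type': 'controller',
--             'category': 'controller',
--             'tags': 'fortinet,controller,management'
--         }
--
--     # Wireless Controllers
--     elif filename_lower.startswith('wlc-'):
--         return {
--             'manufacturer': 'Fortinet',
--             'device_type': 'wireless_controller',
--             'category': 'wireless',
--             'tags': 'fortinet,wireless,controller'
--         }
--
--     # Transceivers and accessories
--     elif any(x in filename_lower for x in ['transceiver', 'sfp', 'qsfp', 'antenna']):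
--         return {
--             'manufacturer': 'Generic',
--             'device_type': 'transceiver',
--             'category': 'accessory',
--             'tags': 'transceiver,networking,fiber,copper'
--         }
--
--     # Default Fortinet device
--     else:
--         return {
--             'manufacturer': 'Fortinet',
--             'device_type': 'fortinet_device',
--             'category': 'device',
--             'tags': 'fortinet,device,networking,security'
--         }
-- ===== SOURCE B (Python) =====
-- # B: tokenize-and-look-up instead of an ordered prefix scan. Every prefix rule in the
-- # original has the form '<token>-', and the tokens are pairwise distinct, so instead of
-- # testing prefixes one after another we split the lowercased name at its FIRST '-' and
-- # look the leading token up in a single dict (one hash lookup replaces 12 startswith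
-- # tests; correctness: name.startswith(tok + '-') iff the part before the first '-'
-- # equals tok, because no token contains '-').
--
-- _FORTIGATE = {'manufacturer': 'Fortinet', 'device_type': 'fortigate',
--               'category': 'firewall', 'tags': 'fortinet,firewall,security,fortigate'}
-- _FORTISWITCH = {'manufacturer': 'Fortinet', 'device_type': 'fortiswitch',
--                 'category': 'switch', 'tags': 'fortinet,switch,networking,fortiswitch'}
-- _FORTIAP = {'manufacturer': 'Fortinet', 'device_type': 'fortiap',
--             'category': 'wireless', 'tags': 'fortinet,wireless,access_point,fortiap'}
-- _MGMT = {'manufacturer': 'Fortinet', 'device_type': 'fortinet_management',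
--          'category': 'management', 'tags': 'fortinet,management,analyzer,security'}
-- _CTRL = {'manufacturer': 'Fortinet', 'device_type': 'controller',
--          'category': 'controller', 'tags': 'fortinet,controller,management'}
-- _WLC = {'manufacturer': 'Fortinet', 'device_type': 'wireless_controller',
--         'category': 'wireless', 'tags': 'fortinet,wireless,controller'}
-- _TRANSCEIVER = {'manufacturer': 'Generic', 'device_type': 'transceiver',
--                 'category': 'accessory', 'tags': 'transceiver,networking,fiber,copper'}
-- _DEFAULT = {'manufacturer': 'Fortinet', 'device_type': 'fortinet_device',
--             'category': 'device', 'tags': 'fortinet,device,networking,security'}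
--
-- # leading token (the part before the first '-') -> classification
-- _PREFIX_TYPES = {
--     'fg': _FORTIGATE, 'fgr': _FORTIGATE, 'fg_fwf': _FORTIGATE,
--     'fsw': _FORTISWITCH, 'fsr': _FORTISWITCH,
--     'fap': _FORTIAP,
--     'faz': _MGMT, 'fmg': _MGMT, 'fml': _MGMT, 'fac': _MGMT,
--     'fctrl': _CTRL,
--     'wlc': _WLC,
-- }
--
--
-- def classify_fortinet_device(filename):
--     """Classify Fortinet devices based on filename patterns"""
--     name = filename.lower()
--     head, sep, _tail = name.partition('-')
--     info = _PREFIX_TYPES.get(head) if sep else None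
--     if info is not None:
--         return dict(info)
--     for pat in ('transceiver', 'sfp', 'qsfp', 'antenna'):
--         if pat in name:
--             return dict(_TRANSCEIVER)
--     return dict(_DEFAULT)
-- ===== Notes on version B (the rewrite author's own statement) =====
-- stated objective: alternative
-- what changed: Instead of testing 12 prefixes one after another, B splits the lowercased name at its first '-' and looks the leading token up in a single dict (correct because every prefix rule is '<token>-' with pairwise-distinct dash-free tokens), then falls back to the substring scan.
import Mathlib
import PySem

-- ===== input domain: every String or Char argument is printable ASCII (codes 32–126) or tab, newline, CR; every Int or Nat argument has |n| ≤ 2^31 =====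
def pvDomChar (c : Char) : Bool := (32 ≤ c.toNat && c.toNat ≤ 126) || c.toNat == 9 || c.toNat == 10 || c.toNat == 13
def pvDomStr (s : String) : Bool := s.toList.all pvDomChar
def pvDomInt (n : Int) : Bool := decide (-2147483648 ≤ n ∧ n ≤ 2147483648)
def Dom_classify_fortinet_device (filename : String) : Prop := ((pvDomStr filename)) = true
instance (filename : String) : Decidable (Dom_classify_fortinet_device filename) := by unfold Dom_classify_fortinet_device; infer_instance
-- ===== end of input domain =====

-- B replaces A's 12 sequential startswith tests by splitting the name at its first '-' and
-- looking the leading token up in one dict (alternative decomposition; same behaviour).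

-- ===== PORT A =====
def classify_fortinet_device (filename : String) : List (String × String) :=
  let fl := PySem.Str.lower filename
  if PySem.Str.startswith fl "fg-" || PySem.Str.startswith fl "fgr-" || PySem.Str.startswith fl "fg_fwf-" then
    [("manufacturer", "Fortinet"), ("device_type", "fortigate"), ("category", "firewall"),
     ("tags", "fortinet,firewall,security,fortigate")]
  else if PySem.Str.startswith fl "fsw-" || PySem.Str.startswith fl "fsr-" then
    [("manufacturer", "Fortinet"), ("device_type", "fortiswitch"), ("category", "switch"),
     ("tags", "fortinet,switch,networking,fortiswitch")]
  else if PySem.Str.startswith fl "fap-" then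
    [("manufacturer", "Fortinet"), ("device_type", "fortiap"), ("category", "wireless"),
     ("tags", "fortinet,wireless,access_point,fortiap")]
  else if PySem.Str.startswith fl "faz-" || PySem.Str.startswith fl "fmg-" ||
          PySem.Str.startswith fl "fml-" || PySem.Str.startswith fl "fac-" then
    [("manufacturer", "Fortinet"), ("device_type", "fortinet_management"), ("category", "management"),
     ("tags", "fortinet,management,analyzer,security")]
  else if PySem.Str.startswith fl "fctrl-" then
    [("manufacturer", "Fortinet"), ("device_type", "controller"), ("category", "controller"),
     ("tags", "fortinet,controller,management")]
  else if PySem.Str.startswith fl "wlc-" then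
    [("manufacturer", "Fortinet"), ("device_type", "wireless_controller"), ("category", "wireless"),
     ("tags", "fortinet,wireless,controller")]
  else if ["transceiver", "sfp", "qsfp", "antenna"].any (fun x => PySem.Str.isIn x fl) then
    [("manufacturer", "Generic"), ("device_type", "transceiver"), ("category", "accessory"),
     ("tags", "transceiver,networking,fiber,copper")]
  else
    [("manufacturer", "Fortinet"), ("device_type", "fortinet_device"), ("category", "device"),
     ("tags", "fortinet,device,networking,security")]

-- ===== PORT B =====
def pvFortigate : List (String × String) :=
  [("manufacturer", "Fortinet"), ("device_type", "fortigate"), ("category", "firewall"),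
   ("tags", "fortinet,firewall,security,fortigate")]
def pvFortiswitch : List (String × String) :=
  [("manufacturer", "Fortinet"), ("device_type", "fortiswitch"), ("category", "switch"),
   ("tags", "fortinet,switch,networking,fortiswitch")]
def pvFortiap : List (String × String) :=
  [("manufacturer", "Fortinet"), ("device_type", "fortiap"), ("category", "wireless"),
   ("tags", "fortinet,wireless,access_point,fortiap")]
def pvMgmt : List (String × String) :=
  [("manufacturer", "Fortinet"), ("device_type", "fortinet_management"), ("category", "management"),
   ("tags", "fortinet,management,analyzer,security")]
def pvCtrl : List (String × String) :=
  [("manufacturer", "Fortinet"), ("device_type", "controller"), ("category", "controller"),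
   ("tags", "fortinet,controller,management")]
def pvWlc : List (String × String) :=
  [("manufacturer", "Fortinet"), ("device_type", "wireless_controller"), ("category", "wireless"),
   ("tags", "fortinet,wireless,controller")]
def pvTransceiver : List (String × String) :=
  [("manufacturer", "Generic"), ("device_type", "transceiver"), ("category", "accessory"),
   ("tags", "transceiver,networking,fiber,copper")]
def pvDefault : List (String × String) :=
  [("manufacturer", "Fortinet"), ("device_type", "fortinet_device"), ("category", "device"),
   ("tags", "fortinet,device,networking,security")]

-- leading token (the part before the first '-') -> classification
def pvPrefixTypes : PySem.Dict String (List (String × String)) :=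
  PySem.Dict.ofList
    [("fg", pvFortigate), ("fgr", pvFortigate), ("fg_fwf", pvFortigate),
     ("fsw", pvFortiswitch), ("fsr", pvFortiswitch),
     ("fap", pvFortiap),
     ("faz", pvMgmt), ("fmg", pvMgmt), ("fml", pvMgmt), ("fac", pvMgmt),
     ("fctrl", pvCtrl),
     ("wlc", pvWlc)]

def classify_fortinet_device_alt (filename : String) : List (String × String) :=
  let name := PySem.Str.lower filename
  -- name.partition('-') hand-ported exactly: sep is nonempty iff name.find('-') ≥ 0,
  -- and then head = name[:name.find('-')]
  let i := PySem.Str.find name "-"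
  let info : Option (List (String × String)) :=
    if 0 ≤ i then PySem.Dict.get? pvPrefixTypes (PySem.Str.slice name none (some i)) else none
  match info with
  | some r => r
  | none =>
    match ["transceiver", "sfp", "qsfp", "antenna"].find? (fun pat => PySem.Str.isIn pat name) with
    | some _ => pvTransceiver
    | none => pvDefault

-- ===== PRECONDITION & SPEC =====
def Spec_classify_fortinet_device (filename : String) (out : List (String × String)) : Prop := out = classify_fortinet_device_alt filename
instance (filename : String) (out : List (String × String)) : Decidable (Spec_classify_fortinet_device filename out) := by unfold Spec_classify_fortinet_device; infer_instance

-- ===== CLAIM (what is proved, stated in full; the proofs are below) =====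
def Claim_equal_classify_fortinet_device : Prop := ∀ (filename : String), Dom_classify_fortinet_device filename → Spec_classify_fortinet_device filename (classify_fortinet_device filename)

-- ===== LEMMAS AND PROOFS =====

-- ['-'] is a prefix exactly when the first character is '-'
lemma pv_dash_prefix (xs : List Char) : (['-'] <+: xs) ↔ xs.head? = some '-' := by
  cases xs <;> simp [List.cons_prefix_cons, eq_comm]

-- if the name contains no '-', no '<token>-' prefix test can succeed
lemma pv_sw_of_no_dash {s : List Char} (h : PySem.Chars.find s ['-'] = -1) (tok : List Char) :
    PySem.Chars.startswith s (tok ++ ['-']) = false := by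
  rw [PySem.Chars.find_eq_neg_one_iff] at h
  rw [← Bool.not_eq_true, PySem.Chars.startswith_iff]
  intro hpre
  exact h (((List.suffix_append tok ['-']).isInfix).trans hpre.isInfix)

-- with a '-' present at (find).toNat, startswith (tok ++ "-") holds iff the part before
-- the first '-' equals tok (tok must be dash-free)
lemma pv_sw_iff_take {s tok : List Char} (hd : '-' ∉ tok)
    (hf : 0 ≤ PySem.Chars.find s ['-']) :
    PySem.Chars.startswith s (tok ++ ['-']) = true ↔
      s.take (PySem.Chars.find s ['-']).toNat = tok := by
  obtain ⟨h1, h2⟩ := PySem.Chars.find_spec (s := s) (sub := ['-']) hf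
  set n := (PySem.Chars.find s ['-']).toNat with hn
  constructor
  · intro hsw
    rw [PySem.Chars.startswith_iff] at hsw
    obtain ⟨t, ht⟩ := hsw
    have hs : s = tok ++ '-' :: t := by rw [← ht]; simp
    have hge : ¬ tok.length < n := by
      intro hlt
      exact h2 tok.length hlt (by rw [hs, List.drop_left]; exact ⟨t, rfl⟩)
    have hle : ¬ n < tok.length := by
      intro hlt
      rw [pv_dash_prefix, List.head?_drop] at h1
      rw [hs, List.getElem?_append_left hlt, List.getElem?_eq_getElem hlt] at h1
      exact hd (by rw [← Option.some_inj.mp h1]; exact List.getElem_mem hlt)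
    have hlen : n = tok.length := by omega
    rw [hs, hlen, List.take_left]
  · intro htk
    obtain ⟨t, ht⟩ : ∃ t, s.drop n = '-' :: t := by
      rcases h1 with ⟨t, ht⟩; exact ⟨t, ht.symm⟩
    rw [PySem.Chars.startswith_iff]
    refine ⟨t, ?_⟩
    calc tok ++ ['-'] ++ t = s.take n ++ ('-' :: t) := by rw [htk]; simp
      _ = s.take n ++ s.drop n := by rw [ht]
      _ = s := List.take_append_drop n s

-- string-level: the prefix test is equality of B's head slice with the token
lemma pv_sw_eq (name : String) (hf : 0 ≤ PySem.Str.find name "-") (tok p : String)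
    (hp : p.toList = tok.toList ++ ['-']) (hd : '-' ∉ tok.toList) :
    PySem.Str.startswith name p =
      decide (PySem.Str.slice name none (some (PySem.Str.find name "-")) = tok) := by
  have hdash : ("-" : String).toList = ['-'] := by decide
  have hf' : 0 ≤ PySem.Chars.find name.toList ['-'] := by
    simpa [hdash] using hf
  have hiff := pv_sw_iff_take (s := name.toList) hd hf'
  have hslice : (PySem.Str.slice name none (some (PySem.Str.find name "-"))).toList
      = name.toList.take (PySem.Chars.find name.toList ['-']).toNat := by
    simp [hdash, PySem.List.slice_to _ hf']
  by_cases h : PySem.Str.slice name none (some (PySem.Str.find name "-")) = tok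
  · simp only [h, decide_true]
    rw [PySem.Str.startswith_eq, hp]
    rw [hiff, ← hslice, h]
  · simp only [h, decide_false]
    rw [← Bool.not_eq_true, PySem.Str.startswith_eq, hp, hiff, ← hslice]
    exact fun he => h (String.toList_inj.mp he)

lemma pv_sw_false (name : String) (hf : PySem.Str.find name "-" < 0) (tok p : String)
    (hp : p.toList = tok.toList ++ ['-']) :
    PySem.Str.startswith name p = false := by
  have hdash : ("-" : String).toList = ['-'] := by decide
  have hneg : PySem.Chars.find name.toList ['-'] = -1 := by
    have h1 := PySem.Chars.neg_one_le_find (s := name.toList) (sub := ['-'])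
    have h2 : PySem.Chars.find name.toList ['-'] < 0 := by simpa [hdash] using hf
    omega
  rw [PySem.Str.startswith_eq, hp]
  exact pv_sw_of_no_dash hneg tok.toList

-- first-match loop over substring patterns = the any-test
lemma pv_tail_eq (name : String) :
    (match ["transceiver", "sfp", "qsfp", "antenna"].find? (fun pat => PySem.Str.isIn pat name) with
     | some _ => pvTransceiver
     | none => pvDefault) =
    (if ["transceiver", "sfp", "qsfp", "antenna"].any (fun x => PySem.Str.isIn x name) then pvTransceiver
     else pvDefault) := by
  cases h : ["transceiver", "sfp", "qsfp", "antenna"].find? (fun pat => PySem.Str.isIn pat name) with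
  | none =>
    rw [List.find?_eq_none] at h
    have hany : ["transceiver", "sfp", "qsfp", "antenna"].any (fun x => PySem.Str.isIn x name) = false := by
      rw [List.any_eq_false]; exact fun x hx => by simpa using h x hx
    rw [hany]; simp
  | some x =>
    have hmem := List.mem_of_find?_eq_some h
    have hpx := List.find?_some h
    have hany : ["transceiver", "sfp", "qsfp", "antenna"].any (fun x => PySem.Str.isIn x name) = true := by
      rw [List.any_eq_true]; exact ⟨x, hmem, hpx⟩
    rw [hany]; simp

-- the key dispatch: A's decided if-chain = B's dict lookup, for every key K
lemma pv_dispatch (K : String) (D : List (String × String)) :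
    (if decide (K = "fg") || decide (K = "fgr") || decide (K = "fg_fwf") then pvFortigate
     else if decide (K = "fsw") || decide (K = "fsr") then pvFortiswitch
     else if decide (K = "fap") then pvFortiap
     else if decide (K = "faz") || decide (K = "fmg") || decide (K = "fml") || decide (K = "fac") then pvMgmt
     else if decide (K = "fctrl") then pvCtrl
     else if decide (K = "wlc") then pvWlc
     else D) =
    (match PySem.Dict.get? pvPrefixTypes K with
     | some r => r
     | none => D) := by
  have htab : pvPrefixTypes = PySem.Dict.mk
      [("fg", pvFortigate), ("fgr", pvFortigate), ("fg_fwf", pvFortigate),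
       ("fsw", pvFortiswitch), ("fsr", pvFortiswitch),
       ("fap", pvFortiap),
       ("faz", pvMgmt), ("fmg", pvMgmt), ("fml", pvMgmt), ("fac", pvMgmt),
       ("fctrl", pvCtrl),
       ("wlc", pvWlc)] := by decide
  rw [htab]
  by_cases h1 : K = "fg"
  · subst h1; rfl
  by_cases h2 : K = "fgr"
  · subst h2; rfl
  by_cases h3 : K = "fg_fwf"
  · subst h3; rfl
  by_cases h4 : K = "fsw"
  · subst h4; rfl
  by_cases h5 : K = "fsr"
  · subst h5; rfl
  by_cases h6 : K = "fap"
  · subst h6; rfl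
  by_cases h7 : K = "faz"
  · subst h7; rfl
  by_cases h8 : K = "fmg"
  · subst h8; rfl
  by_cases h9 : K = "fml"
  · subst h9; rfl
  by_cases h10 : K = "fac"
  · subst h10; rfl
  by_cases h11 : K = "fctrl"
  · subst h11; rfl
  by_cases h12 : K = "wlc"
  · subst h12; rfl
  simp [PySem.Dict.get?_mk_cons, beq_iff_eq, Ne.symm h1, Ne.symm h2, Ne.symm h3, Ne.symm h4, Ne.symm h5, Ne.symm h6, Ne.symm h7, Ne.symm h8, Ne.symm h9, Ne.symm h10, Ne.symm h11, Ne.symm h12, h1, h2, h3, h4, h5, h6, h7, h8, h9, h10, h11, h12]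
  rfl

-- ===== VERDICT (by name: the statement is the Claim_ definition above) =====
set_option maxHeartbeats 2000000 in
theorem classify_fortinet_device_spec : Claim_equal_classify_fortinet_device := by
  intro filename _
  unfold Spec_classify_fortinet_device classify_fortinet_device classify_fortinet_device_alt
  simp only []
  set name := PySem.Str.lower filename with hname
  rw [show ([("manufacturer", "Fortinet"), ("device_type", "fortigate"), ("category", "firewall"),
        ("tags", "fortinet,firewall,security,fortigate")] : List (String × String)) = pvFortigate from rfl,
      show ([("manufacturer", "Fortinet"), ("device_type", "fortiswitch"), ("category", "switch"),
        ("tags", "fortinet,switch,networking,fortiswitch")] : List (String × String)) = pvFortiswitch from rfl,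
      show ([("manufacturer", "Fortinet"), ("device_type", "fortiap"), ("category", "wireless"),
        ("tags", "fortinet,wireless,access_point,fortiap")] : List (String × String)) = pvFortiap from rfl,
      show ([("manufacturer", "Fortinet"), ("device_type", "fortinet_management"), ("category", "management"),
        ("tags", "fortinet,management,analyzer,security")] : List (String × String)) = pvMgmt from rfl,
      show ([("manufacturer", "Fortinet"), ("device_type", "controller"), ("category", "controller"),
        ("tags", "fortinet,controller,management")] : List (String × String)) = pvCtrl from rfl,
      show ([("manufacturer", "Fortinet"), ("device_type", "wireless_controller"), ("category", "wireless"),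
        ("tags", "fortinet,wireless,controller")] : List (String × String)) = pvWlc from rfl,
      show ([("manufacturer", "Generic"), ("device_type", "transceiver"), ("category", "accessory"),
        ("tags", "transceiver,networking,fiber,copper")] : List (String × String)) = pvTransceiver from rfl,
      show ([("manufacturer", "Fortinet"), ("device_type", "fortinet_device"), ("category", "device"),
        ("tags", "fortinet,device,networking,security")] : List (String × String)) = pvDefault from rfl]
  by_cases hf : 0 ≤ PySem.Str.find name "-"
  · rw [pv_sw_eq name hf "fg" "fg-" (by decide) (by decide),
        pv_sw_eq name hf "fgr" "fgr-" (by decide) (by decide),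
        pv_sw_eq name hf "fg_fwf" "fg_fwf-" (by decide) (by decide),
        pv_sw_eq name hf "fsw" "fsw-" (by decide) (by decide),
        pv_sw_eq name hf "fsr" "fsr-" (by decide) (by decide),
        pv_sw_eq name hf "fap" "fap-" (by decide) (by decide),
        pv_sw_eq name hf "faz" "faz-" (by decide) (by decide),
        pv_sw_eq name hf "fmg" "fmg-" (by decide) (by decide),
        pv_sw_eq name hf "fml" "fml-" (by decide) (by decide),
        pv_sw_eq name hf "fac" "fac-" (by decide) (by decide),
        pv_sw_eq name hf "fctrl" "fctrl-" (by decide) (by decide),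
        pv_sw_eq name hf "wlc" "wlc-" (by decide) (by decide),
        if_pos hf]
    rw [← pv_tail_eq name]
    exact pv_dispatch _ _
  · rw [pv_sw_false name (by omega) "fg" "fg-" (by decide),
        pv_sw_false name (by omega) "fgr" "fgr-" (by decide),
        pv_sw_false name (by omega) "fg_fwf" "fg_fwf-" (by decide),
        pv_sw_false name (by omega) "fsw" "fsw-" (by decide),
        pv_sw_false name (by omega) "fsr" "fsr-" (by decide),
        pv_sw_false name (by omega) "fap" "fap-" (by decide),
        pv_sw_false name (by omega) "faz" "faz-" (by decide),
        pv_sw_false name (by omega) "fmg" "fmg-" (by decide),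
        pv_sw_false name (by omega) "fml" "fml-" (by decide),
        pv_sw_false name (by omega) "fac" "fac-" (by decide),
        pv_sw_false name (by omega) "fctrl" "fctrl-" (by decide),
        pv_sw_false name (by omega) "wlc" "wlc-" (by decide),
        if_neg hf]
    simp only [Bool.or_self, Bool.false_or, if_neg (by decide : ¬ (false = true))]
    exact (pv_tail_eq name).symm
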